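-- pv_equiv track=rewrite | github.com/oscar351/MobleTeamProject | projectManage/sqlProjectManage.py | uUpdateProjInfo
-- ===== SOURCE A (Python) =====
-- UPDATE_PROJECTDEFAULT_INFO = """UPDATE PROJECT SET """
--
-- def uUpdateProjInfo(consCode, updateInfoList):
--     query = UPDATE_PROJECTDEFAULT_INFO
--     index = 0
--     listSize = len(updateInfoList)
--     for updateInfo in updateInfoList:
--         if listSize > 1:
--             if index < listSize - 1:
--                 query += updateInfo["key"] + ' = "' + updateInfo["value"] + '", '
--             else:
--                 query += updateInfo["key"] + ' = "' + updateInfo["value"] + '" '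
--
--             index += 1
--         else:
--             query += updateInfo["key"] + ' = "' + updateInfo["value"] + '" '
--
--     query += 'WHERE CONS_CODE = "' + consCode + '"'
--     return query
-- ===== SOURCE B (Python) =====
-- UPDATE_PROJECTDEFAULT_INFO = """UPDATE PROJECT SET """
--
--
-- def uUpdateProjInfo(consCode, updateInfoList):
--     fragments = [info["key"] + ' = "' + info["value"] + '"' for info in updateInfoList]
--     query = UPDATE_PROJECTDEFAULT_INFO
--     if fragments:
--         query += ', '.join(fragments) + ' '
--     return query + 'WHERE CONS_CODE = "' + consCode + '"'
-- ===== Notes on version B (the rewrite author's own statement) =====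
-- stated objective: simpler
-- what changed: Replaces the index/listSize separator branching inside the loop with building a list of fragments and joining them with ', ' (plus one trailing space when non-empty).
import Mathlib
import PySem

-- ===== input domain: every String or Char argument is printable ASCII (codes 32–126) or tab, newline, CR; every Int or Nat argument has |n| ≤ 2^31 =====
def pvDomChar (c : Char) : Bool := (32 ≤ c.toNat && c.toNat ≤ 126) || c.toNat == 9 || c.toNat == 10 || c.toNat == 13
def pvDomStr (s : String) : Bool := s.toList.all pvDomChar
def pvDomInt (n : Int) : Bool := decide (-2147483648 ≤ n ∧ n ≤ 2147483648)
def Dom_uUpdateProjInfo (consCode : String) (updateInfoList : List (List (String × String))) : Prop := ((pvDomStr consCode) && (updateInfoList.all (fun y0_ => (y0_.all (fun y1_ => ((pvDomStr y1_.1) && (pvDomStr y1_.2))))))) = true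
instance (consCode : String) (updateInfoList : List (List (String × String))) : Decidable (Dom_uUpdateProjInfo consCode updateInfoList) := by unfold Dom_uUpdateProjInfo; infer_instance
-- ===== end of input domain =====

-- B replaces the per-iteration index/listSize separator branching with fragments + ', '.join (objective: simpler).

-- ===== PORT A =====
def uUpdateProjInfo (consCode : String) (updateInfoList : List (List (String × String))) : String :=
  let listSize := updateInfoList.length
  let r := updateInfoList.foldl (fun (qi : String × Nat) updateInfo =>
    if listSize > 1 then
      if qi.2 < listSize - 1 then
        (qi.1 ++ (PySem.Dict.mk updateInfo).getD "key" "" ++ " = \"" ++ (PySem.Dict.mk updateInfo).getD "value" "" ++ "\", ", qi.2 + 1)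
      else
        (qi.1 ++ (PySem.Dict.mk updateInfo).getD "key" "" ++ " = \"" ++ (PySem.Dict.mk updateInfo).getD "value" "" ++ "\" ", qi.2 + 1)
    else
      (qi.1 ++ (PySem.Dict.mk updateInfo).getD "key" "" ++ " = \"" ++ (PySem.Dict.mk updateInfo).getD "value" "" ++ "\" ", qi.2))
    ("UPDATE PROJECT SET ", 0)
  r.1 ++ "WHERE CONS_CODE = \"" ++ consCode ++ "\""

-- ===== PORT B =====
def uUpdateProjInfo_alt (consCode : String) (updateInfoList : List (List (String × String))) : String :=
  let fragments := updateInfoList.map (fun info =>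
    (PySem.Dict.mk info).getD "key" "" ++ " = \"" ++ (PySem.Dict.mk info).getD "value" "" ++ "\"")
  let query := "UPDATE PROJECT SET "
  let query := if fragments.isEmpty then query else query ++ PySem.Str.join ", " fragments ++ " "
  query ++ "WHERE CONS_CODE = \"" ++ consCode ++ "\""

-- ===== PRECONDITION & SPEC =====
-- Pre_ excludes inputs where some dict lacks the "key" or "value" entry: there Python A raises KeyError.
def Pre_uUpdateProjInfo (consCode : String) (updateInfoList : List (List (String × String))) : Prop :=
  (updateInfoList.all (fun info => (PySem.Dict.mk info).contains "key" && (PySem.Dict.mk info).contains "value")) = true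
instance (consCode : String) (updateInfoList : List (List (String × String))) : Decidable (Pre_uUpdateProjInfo consCode updateInfoList) := by unfold Pre_uUpdateProjInfo; infer_instance

def pvWitness_uUpdateProjInfo : String × (List (List (String × String))) :=
  ("C001", [[("key", "NAME"), ("value", "bridge")], [("key", "CITY"), ("value", "Seoul")]])

def Spec_uUpdateProjInfo (consCode : String) (updateInfoList : List (List (String × String))) (out : String) : Prop := out = uUpdateProjInfo_alt consCode updateInfoList
instance (consCode : String) (updateInfoList : List (List (String × String))) (out : String) : Decidable (Spec_uUpdateProjInfo consCode updateInfoList out) := by unfold Spec_uUpdateProjInfo; infer_instance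

-- ===== CLAIM (what is proved, stated in full; the proofs are below) =====
def Claim_equal_uUpdateProjInfo : Prop := ∀ (consCode : String) (updateInfoList : List (List (String × String))), Dom_uUpdateProjInfo consCode updateInfoList → Pre_uUpdateProjInfo consCode updateInfoList → Spec_uUpdateProjInfo consCode updateInfoList (uUpdateProjInfo consCode updateInfoList)

-- ===== LEMMAS AND PROOFS =====

/-- The fragment built for one dict (shared shape of both ports' per-element text). -/
def pvFrag (info : List (String × String)) : String :=
  (PySem.Dict.mk info).getD "key" "" ++ " = \"" ++ (PySem.Dict.mk info).getD "value" "" ++ "\""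

theorem str_join_cons_cons (p q : String) (rest : List String) :
    PySem.Str.join ", " (p :: q :: rest) = p ++ ", " ++ PySem.Str.join ", " (q :: rest) := by
  apply String.toList_inj.mp
  simp [PySem.Str.toList_join, PySem.Chars.join_cons_cons]

theorem str_join_singleton (p : String) : PySem.Str.join ", " [p] = p := by
  apply String.toList_inj.mp
  simp [PySem.Str.toList_join, PySem.Chars.join_singleton]

/-- Loop invariant for A when listSize > 1: the remaining fold appends the joined fragments plus a space. -/
theorem loopA (n : ℕ) :
    ∀ (xs : List (List (String × String))) (q : String) (i : ℕ),
    xs ≠ [] → i + xs.length = n →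
    (xs.foldl (fun (qi : String × Nat) updateInfo =>
      if qi.2 < n - 1 then
        (qi.1 ++ (PySem.Dict.mk updateInfo).getD "key" "" ++ " = \"" ++ (PySem.Dict.mk updateInfo).getD "value" "" ++ "\", ", qi.2 + 1)
      else
        (qi.1 ++ (PySem.Dict.mk updateInfo).getD "key" "" ++ " = \"" ++ (PySem.Dict.mk updateInfo).getD "value" "" ++ "\" ", qi.2 + 1)) (q, i)).1
    = q ++ PySem.Str.join ", " (xs.map pvFrag) ++ " " := by
  intro xs
  induction xs with
  | nil => intro q i h _; exact absurd rfl h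
  | cons x tail ih =>
    intro q i _ hlen
    cases tail with
    | nil =>
      have hi : ¬ (i < n - 1) := by simp at hlen; omega
      rw [List.foldl_cons, if_neg hi]
      simp only [List.foldl_nil, List.map, str_join_singleton, pvFrag]
      apply String.toList_inj.mp
      simp [String.toList_append]
    | cons y rest =>
      have hi : i < n - 1 := by simp at hlen; omega
      rw [List.foldl_cons, if_pos hi,
        ih (q ++ (PySem.Dict.mk x).getD "key" "" ++ " = \"" ++ (PySem.Dict.mk x).getD "value" "" ++ "\", ") (i + 1) (by simp) (by simp at hlen ⊢; omega)]
      simp only [List.map, str_join_cons_cons, pvFrag]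
      apply String.toList_inj.mp
      simp [String.toList_append]

-- ===== VERDICT (by name: the statement is the Claim_ definition above) =====
theorem uUpdateProjInfo_spec : Claim_equal_uUpdateProjInfo := by
  intro consCode l _ _
  unfold Spec_uUpdateProjInfo uUpdateProjInfo uUpdateProjInfo_alt
  match l with
  | [] => rfl
  | [x] =>
    simp only [List.length_cons, List.length_nil, List.foldl, List.map, List.isEmpty,
      str_join_singleton]
    norm_num
    apply String.toList_inj.mp
    simp [String.toList_append]
  | x :: y :: rest =>
    have hn : 1 < (x :: y :: rest).length := by simp
    simp only [if_pos hn]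
    rw [loopA ((x :: y :: rest).length) (x :: y :: rest) "UPDATE PROJECT SET " 0 (by simp) (by simp)]
    simp only [List.isEmpty, List.map]
    rfl
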